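-- pv_equiv track=rewrite | github.com/posl/comment_recommendation | script/mod_gen/3_time/zh/099_D/4.py | get_min_error
-- ===== SOURCE A (Python) =====
-- def get_min_error(squares, n, c):
--     min_error = 1000000000
--     for i in range(c):
--         for j in range(c):
--             for k in range(c):
--                 if i != j and j != k and k != i:
--                     error = 0
--                     for l in range(n):
--                         for m in range(n):
--                             if (l + m) % 3 == 0:
--                                 error += squares[l][m][i]
--                             elif (l + m) % 3 == 1:
--                                 error += squares[l][m][j]
--                             elif (l + m) % 3 == 2:
--                                 error += squares[l][m][k]
--                     min_error = min(min_error, error)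
--     return min_error
-- ===== SOURCE B (Python) =====
-- def get_min_error(squares, n, c):
--     if c < 3:
--         return 1000000000
--
--     def class_sum(r, col):
--         s = 0
--         for l in range(n):
--             for m in range(n):
--                 if (l + m) % 3 == r:
--                     s += squares[l][m][col]
--         return s
--
--     cost = [[class_sum(r, col) for col in range(c)] for r in range(3)]
--     best = 1000000000
--     for i in range(c):
--         for j in range(c):
--             if j == i:
--                 continue
--             for k in range(c):
--                 if k != i and k != j:
--                     best = min(best, cost[0][i] + cost[1][j] + cost[2][k])
--     return best
-- ===== Notes on version B (the rewrite author's own statement) =====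
-- stated objective: faster
-- what changed: B precomputes, once, the per-color sum of each of the three (l+m)%3 residue classes, so each distinct color triple is scored by three O(1) table lookups instead of re-scanning the whole n x n grid.
import Mathlib
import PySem

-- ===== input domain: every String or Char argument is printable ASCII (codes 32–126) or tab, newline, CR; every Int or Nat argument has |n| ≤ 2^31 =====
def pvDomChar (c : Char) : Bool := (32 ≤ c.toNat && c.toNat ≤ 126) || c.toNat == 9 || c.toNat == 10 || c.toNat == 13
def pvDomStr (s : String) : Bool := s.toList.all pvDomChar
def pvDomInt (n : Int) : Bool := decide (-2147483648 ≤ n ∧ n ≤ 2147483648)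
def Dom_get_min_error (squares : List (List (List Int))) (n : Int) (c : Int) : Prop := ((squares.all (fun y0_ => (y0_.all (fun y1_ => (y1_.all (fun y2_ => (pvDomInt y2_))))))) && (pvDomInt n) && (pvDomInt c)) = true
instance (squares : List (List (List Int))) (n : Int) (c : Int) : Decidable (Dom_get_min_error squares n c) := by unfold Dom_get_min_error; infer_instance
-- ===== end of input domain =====

-- B precomputes per-residue-class per-color sums once so each color triple is scored by table lookups (asymptotically faster); A = B on Pre_ (inputs where the Python A returns).


-- ===== PORT A =====
-- squares[l][m][x]; under Pre_ every such access is in range, so the pyGetD defaults are never reached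
def pvCell (squares : List (List (List Int))) (l m x : Int) : Int :=
  PySem.List.pyGetD (PySem.List.pyGetD (PySem.List.pyGetD squares l []) m []) x 0

def get_min_error (squares : List (List (List Int))) (n : Int) (c : Int) : Int :=
  (PySem.List.pyRange 0 c 1).foldl (fun acc1 i =>
    (PySem.List.pyRange 0 c 1).foldl (fun acc2 j =>
      (PySem.List.pyRange 0 c 1).foldl (fun acc3 k =>
        if i ≠ j ∧ j ≠ k ∧ k ≠ i then
          min acc3 ((PySem.List.pyRange 0 n 1).foldl (fun e l =>
            (PySem.List.pyRange 0 n 1).foldl (fun e m =>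
              if PySem.Int.mod (l + m) 3 = 0 then e + pvCell squares l m i
              else if PySem.Int.mod (l + m) 3 = 1 then e + pvCell squares l m j
              else if PySem.Int.mod (l + m) 3 = 2 then e + pvCell squares l m k
              else e) e) 0)
        else acc3) acc2) acc1) 1000000000

-- ===== PORT B =====
-- Source B's class_sum(r, col): sum of squares[l][m][col] over the cells of residue class r
def pvClassSum (squares : List (List (List Int))) (n r col : Int) : Int :=
  (PySem.List.pyRange 0 n 1).foldl (fun s l =>
    (PySem.List.pyRange 0 n 1).foldl (fun s m =>
      if PySem.Int.mod (l + m) 3 = r then s + pvCell squares l m col else s) s) 0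

def get_min_error_alt (squares : List (List (List Int))) (n : Int) (c : Int) : Int :=
  if c < 3 then 1000000000 else
  let cost : List (List Int) :=
    (PySem.List.pyRange 0 3 1).map (fun r =>
      (PySem.List.pyRange 0 c 1).map (fun col => pvClassSum squares n r col))
  (PySem.List.pyRange 0 c 1).foldl (fun best i =>
    (PySem.List.pyRange 0 c 1).foldl (fun best j =>
      if j = i then best
      else (PySem.List.pyRange 0 c 1).foldl (fun best k =>
        if k ≠ i ∧ k ≠ j then
          min best (PySem.List.pyGetD (PySem.List.pyGetD cost 0 []) i 0 +
                    PySem.List.pyGetD (PySem.List.pyGetD cost 1 []) j 0 +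
                    PySem.List.pyGetD (PySem.List.pyGetD cost 2 []) k 0)
        else best) best) best) 1000000000

-- ===== PRECONDITION & SPEC =====
-- Pre_ excludes exactly the inputs on which Python A raises IndexError: when c ≥ 3 the loops
-- read squares[l][m][col] for all l, m < n and col < c, so the grid must be at least n × n × c.
def Pre_get_min_error (squares : List (List (List Int))) (n : Int) (c : Int) : Prop :=
  3 ≤ c → n ≤ (squares.length : Int) ∧
    ∀ row ∈ squares.take n.toNat, n ≤ (row.length : Int) ∧
      ∀ cell ∈ row.take n.toNat, c ≤ (cell.length : Int)
instance (squares : List (List (List Int))) (n : Int) (c : Int) : Decidable (Pre_get_min_error squares n c) := by unfold Pre_get_min_error; infer_instance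

def pvWitness_get_min_error : List (List (List Int)) × Int × Int := ([[[1, 2, 3]]], 1, 3)

def Spec_get_min_error (squares : List (List (List Int))) (n : Int) (c : Int) (out : Int) : Prop := out = get_min_error_alt squares n c
instance (squares : List (List (List Int))) (n : Int) (c : Int) (out : Int) : Decidable (Spec_get_min_error squares n c out) := by unfold Spec_get_min_error; infer_instance

-- ===== CLAIM (what is proved, stated in full; the proofs are below) =====
def Claim_equal_get_min_error : Prop := ∀ (squares : List (List (List Int))) (n : Int) (c : Int), Dom_get_min_error squares n c → Pre_get_min_error squares n c → Spec_get_min_error squares n c (get_min_error squares n c)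

-- ===== LEMMAS AND PROOFS =====

-- a foldl whose step adds to its accumulator can be started at 0 and shifted
theorem pv_foldl_shift {α : Type} (f : Int → α → Int) (hf : ∀ a x, f a x = a + f 0 x) :
    ∀ (xs : List α) (a : Int), xs.foldl f a = a + xs.foldl f 0 := by
  intro xs
  induction xs with
  | nil => intro a; simp
  | cons x xs ih =>
    intro a
    simp only [List.foldl_cons]
    rw [ih (f a x), ih (f 0 x), hf a x]
    omega

theorem pv_inner_shift (squares : List (List (List Int))) (l r col : Int) :
    ∀ (ms : List Int) (a : Int),
      ms.foldl (fun s m => if PySem.Int.mod (l + m) 3 = r then s + pvCell squares l m col else s) a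
        = a + ms.foldl (fun s m => if PySem.Int.mod (l + m) 3 = r then s + pvCell squares l m col else s) 0 := by
  intro ms a
  exact pv_foldl_shift _ (by intro b m; split <;> omega) ms a

-- one row of A's error loop splits into the three per-residue sums
theorem pv_row_split (squares : List (List (List Int))) (l i j k : Int) :
    ∀ (ms : List Int) (a : Int),
      ms.foldl (fun e m =>
          if PySem.Int.mod (l + m) 3 = 0 then e + pvCell squares l m i
          else if PySem.Int.mod (l + m) 3 = 1 then e + pvCell squares l m j
          else if PySem.Int.mod (l + m) 3 = 2 then e + pvCell squares l m k
          else e) a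
        = a + ms.foldl (fun s m => if PySem.Int.mod (l + m) 3 = 0 then s + pvCell squares l m i else s) 0
            + ms.foldl (fun s m => if PySem.Int.mod (l + m) 3 = 1 then s + pvCell squares l m j else s) 0
            + ms.foldl (fun s m => if PySem.Int.mod (l + m) 3 = 2 then s + pvCell squares l m k else s) 0 := by
  intro ms
  induction ms with
  | nil => intro a; simp
  | cons m ms ih =>
    intro a
    simp only [List.foldl_cons]
    rw [ih]
    by_cases h0 : PySem.Int.mod (l + m) 3 = 0
    · rw [if_pos h0, if_pos h0, if_neg (show ¬PySem.Int.mod (l + m) 3 = 1 by omega),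
          if_neg (show ¬PySem.Int.mod (l + m) 3 = 2 by omega),
          pv_inner_shift squares l 0 i ms (0 + pvCell squares l m i)]
      omega
    · by_cases h1 : PySem.Int.mod (l + m) 3 = 1
      · rw [if_neg h0, if_pos h1, if_neg h0, if_pos h1,
            if_neg (show ¬PySem.Int.mod (l + m) 3 = 2 by omega),
            pv_inner_shift squares l 1 j ms (0 + pvCell squares l m j)]
        omega
      · by_cases h2 : PySem.Int.mod (l + m) 3 = 2
        · rw [if_neg h0, if_neg h1, if_pos h2, if_neg h0, if_neg h1, if_pos h2,
              pv_inner_shift squares l 2 k ms (0 + pvCell squares l m k)]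
          omega
        · rw [if_neg h0, if_neg h1, if_neg h2, if_neg h0, if_neg h1, if_neg h2]

-- A's whole n × n error loop for the triple (i, j, k) equals the three class sums
theorem pv_error_split (squares : List (List (List Int))) (i j k : Int) :
    ∀ (ls ms : List Int) (a : Int),
      ls.foldl (fun e l => ms.foldl (fun e m =>
          if PySem.Int.mod (l + m) 3 = 0 then e + pvCell squares l m i
          else if PySem.Int.mod (l + m) 3 = 1 then e + pvCell squares l m j
          else if PySem.Int.mod (l + m) 3 = 2 then e + pvCell squares l m k
          else e) e) a
        = a + ls.foldl (fun s l => ms.foldl (fun s m => if PySem.Int.mod (l + m) 3 = 0 then s + pvCell squares l m i else s) s) 0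
            + ls.foldl (fun s l => ms.foldl (fun s m => if PySem.Int.mod (l + m) 3 = 1 then s + pvCell squares l m j else s) s) 0
            + ls.foldl (fun s l => ms.foldl (fun s m => if PySem.Int.mod (l + m) 3 = 2 then s + pvCell squares l m k else s) s) 0 := by
  intro ls ms
  induction ls with
  | nil => intro a; simp
  | cons l ls ih =>
    intro a
    simp only [List.foldl_cons]
    rw [ih]
    have hb : ∀ (r col : Int), ls.foldl (fun s l' => ms.foldl (fun s m => if PySem.Int.mod (l' + m) 3 = r then s + pvCell squares l' m col else s) s)
        (ms.foldl (fun s m => if PySem.Int.mod (l + m) 3 = r then s + pvCell squares l m col else s) 0)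
        = ms.foldl (fun s m => if PySem.Int.mod (l + m) 3 = r then s + pvCell squares l m col else s) 0
          + ls.foldl (fun s l' => ms.foldl (fun s m => if PySem.Int.mod (l' + m) 3 = r then s + pvCell squares l' m col else s) s) 0 := by
      intro r col
      exact pv_foldl_shift _ (fun b l' => pv_inner_shift squares l' r col ms b) ls _
    rw [hb 0 i, hb 1 j, hb 2 k, pv_row_split squares l i j k ms a]
    omega

theorem pv_error_eq_class_sums (squares : List (List (List Int))) (n i j k : Int) :
    (PySem.List.pyRange 0 n 1).foldl (fun e l =>
        (PySem.List.pyRange 0 n 1).foldl (fun e m =>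
          if PySem.Int.mod (l + m) 3 = 0 then e + pvCell squares l m i
          else if PySem.Int.mod (l + m) 3 = 1 then e + pvCell squares l m j
          else if PySem.Int.mod (l + m) 3 = 2 then e + pvCell squares l m k
          else e) e) 0
      = pvClassSum squares n 0 i + pvClassSum squares n 1 j + pvClassSum squares n 2 k := by
  have := pv_error_split squares i j k (PySem.List.pyRange 0 n 1) (PySem.List.pyRange 0 n 1) 0
  simpa [pvClassSum] using this

theorem pv_cost_lookup (squares : List (List (List Int))) (n c r x : Int)
    (hr : 0 ≤ r) (hr3 : r < 3) (hx : 0 ≤ x) (hxc : x < c) :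
    PySem.List.pyGetD (PySem.List.pyGetD
        ((PySem.List.pyRange 0 3 1).map (fun r' =>
          (PySem.List.pyRange 0 c 1).map (fun col => pvClassSum squares n r' col))) r []) x 0
      = pvClassSum squares n r x := by
  rw [PySem.List.pyGetD_map_pyRange_of_nonneg _ 3 r [] hr hr3]
  exact PySem.List.pyGetD_map_pyRange_of_nonneg _ c x 0 hx hxc

theorem pv_foldl_id {α : Type} (xs : List α) (a : Int) : xs.foldl (fun b _ => b) a = a := by
  induction xs <;> simp_all

theorem pv_foldl_congr {α : Type} (xs : List α) (f g : Int → α → Int) (a : Int)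
    (h : ∀ b x, x ∈ xs → f b x = g b x) : xs.foldl f a = xs.foldl g a := by
  induction xs generalizing a with
  | nil => rfl
  | cons x xs ih =>
    simp only [List.foldl_cons]
    rw [h a x (by simp)]
    exact ih _ (fun b y hy => h b y (by simp [hy]))

-- ===== VERDICT (by name: the statement is the Claim_ definition above) =====
theorem get_min_error_spec : Claim_equal_get_min_error := by
  intro squares n c _ _
  unfold Spec_get_min_error get_min_error get_min_error_alt
  by_cases hc : c < 3
  · -- no triple of pairwise-distinct colors exists: A's loops never update min_error
    simp only [if_pos hc]
    apply Eq.trans (pv_foldl_congr _ _ (fun b _ => b) _ ?_) (pv_foldl_id _ _)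
    intro b i hi
    apply Eq.trans (pv_foldl_congr _ _ (fun b _ => b) _ ?_) (pv_foldl_id _ _)
    intro b' j hj
    apply Eq.trans (pv_foldl_congr _ _ (fun b _ => b) _ ?_) (pv_foldl_id _ _)
    intro b'' k hk
    rw [PySem.List.mem_pyRange_one] at hi hj hk
    rw [if_neg (by omega)]
  · simp only [if_neg hc]
    apply pv_foldl_congr
    intro b i hi
    apply pv_foldl_congr
    intro b' j hj
    rw [PySem.List.mem_pyRange_one] at hi hj
    by_cases hij : j = i
    · rw [if_pos hij]
      apply Eq.trans (pv_foldl_congr _ _ (fun b _ => b) _ ?_) (pv_foldl_id _ _)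
      intro b'' k _
      rw [if_neg (by omega)]
    · rw [if_neg hij]
      apply pv_foldl_congr
      intro b'' k hk
      rw [PySem.List.mem_pyRange_one] at hk
      have hcond : (i ≠ j ∧ j ≠ k ∧ k ≠ i) ↔ (k ≠ i ∧ k ≠ j) := by omega
      rw [if_congr hcond rfl rfl]
      split
      · rw [pv_error_eq_class_sums,
            pv_cost_lookup squares n c 0 i (by omega) (by omega) (by omega) (by omega),
            pv_cost_lookup squares n c 1 j (by omega) (by omega) (by omega) (by omega),
            pv_cost_lookup squares n c 2 k (by omega) (by omega) (by omega) (by omega)]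
      · rfl
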